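-- pv_equiv track=rewrite | github.com/LavanyaSrinivas06/AI-First-Preauth-Fraud-Detection | thesis_quality/benchmarking/load/run_load.py | _pick_aggregated_row
-- ===== SOURCE A (Python) =====
-- from typing import Dict, List, Optional, Tuple
--
-- def _pick_aggregated_row(stats_rows: List[Dict[str, str]]) -> Optional[Dict[str, str]]:
--     """
--     Locust stats.csv typically has:
--       Type,Name,Request Count,Failure Count,Median Response Time,Average Response Time,...
--     We prefer:
--       Type == 'Aggregated' OR Name == 'Aggregated'
--     If not present, fall back to POST /preauth/decision row.
--     """
--     if not stats_rows:
--         return None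
--
--     # 1) aggregated if exists
--     for r in stats_rows:
--         t = (r.get("Type") or "").strip().lower()
--         name = (r.get("Name") or "").strip().lower()
--         if t == "aggregated" or name == "aggregated":
--             return r
--
--     # 2) common endpoint row
--     for r in stats_rows:
--         if (r.get("Name") or "").strip() == "/preauth/decision":
--             return r
--
--     # 3) first row
--     return stats_rows[0]
-- ===== SOURCE B (Python) =====
-- from typing import Dict, List, Optional
--
-- def _pick_aggregated_row(stats_rows: List[Dict[str, str]]) -> Optional[Dict[str, str]]:
--     if not stats_rows:
--         return None
--     agg = None
--     ep = None
--     for r in stats_rows: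
--         if agg is None:
--             t = (r.get("Type") or "").strip().lower()
--             name = (r.get("Name") or "").strip().lower()
--             if t == "aggregated" or name == "aggregated":
--                 agg = r
--         if ep is None and (r.get("Name") or "").strip() == "/preauth/decision":
--             ep = r
--     if agg is not None:
--         return agg
--     if ep is not None:
--         return ep
--     return stats_rows[0]
-- ===== Notes on version B (the rewrite author's own statement) =====
-- stated objective: alternative
-- what changed: A's two sequential first-match scans are merged into a single pass that maintains two never-overwritten candidate slots (aggregated, endpoint) and resolves priority after the loop.
import Mathlib
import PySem

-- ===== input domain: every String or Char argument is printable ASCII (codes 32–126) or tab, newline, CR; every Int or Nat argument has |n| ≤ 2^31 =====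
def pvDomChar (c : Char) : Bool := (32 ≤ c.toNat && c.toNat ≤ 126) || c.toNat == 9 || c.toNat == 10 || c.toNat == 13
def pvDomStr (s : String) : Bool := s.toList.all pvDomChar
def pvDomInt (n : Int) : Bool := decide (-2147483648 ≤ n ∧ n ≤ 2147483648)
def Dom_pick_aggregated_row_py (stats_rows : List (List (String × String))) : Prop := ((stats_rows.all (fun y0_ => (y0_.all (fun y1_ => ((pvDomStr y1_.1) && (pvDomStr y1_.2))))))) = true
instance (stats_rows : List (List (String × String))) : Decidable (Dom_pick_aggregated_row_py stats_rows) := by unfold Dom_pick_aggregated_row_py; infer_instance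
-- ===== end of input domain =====

-- B replaces A's two sequential first-match scans by ONE pass holding two never-overwritten
-- candidate slots (aggregated, endpoint), resolving the priority after the loop.

-- shared primitive: (r.get(k) or "") on a row given as an association list (first match)
def pvGetOrEmpty (r : List (String × String)) (k : String) : String :=
  match r.find? (fun p => p.1 == k) with
  | some p => p.2
  | none => ""

-- the two row predicates, exactly as A's branch conditions
def pvIsAgg (r : List (String × String)) : Bool :=
  PySem.Str.lower (PySem.Str.strip (pvGetOrEmpty r "Type")) == "aggregated"
    || PySem.Str.lower (PySem.Str.strip (pvGetOrEmpty r "Name")) == "aggregated"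

def pvIsEp (r : List (String × String)) : Bool :=
  PySem.Str.strip (pvGetOrEmpty r "Name") == "/preauth/decision"

-- ===== PORT A =====
-- first loop of A: return the first aggregated row
def pvScanAgg : List (List (String × String)) → Option (List (String × String))
  | [] => none
  | r :: rest => if pvIsAgg r then some r else pvScanAgg rest

-- second loop of A: return the first /preauth/decision row
def pvScanEp : List (List (String × String)) → Option (List (String × String))
  | [] => none
  | r :: rest => if pvIsEp r then some r else pvScanEp rest

def pick_aggregated_row_py (stats_rows : List (List (String × String))) : Option (List (String × String)) :=
  if stats_rows.isEmpty then none
  else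
    match pvScanAgg stats_rows with
    | some r => some r
    | none =>
      match pvScanEp stats_rows with
      | some r => some r
      | none => PySem.List.pyGet? stats_rows 0   -- stats_rows[0]; in range here

-- ===== PORT B =====
-- one loop iteration of B: fill each empty slot the first time its predicate matches
def pvStep (st : Option (List (String × String)) × Option (List (String × String)))
    (r : List (String × String)) :
    Option (List (String × String)) × Option (List (String × String)) :=
  ( match st.1 with
    | some a => some a
    | none => if pvIsAgg r then some r else none,
    match st.2 with
    | some e => some e
    | none => if pvIsEp r then some r else none )

def pick_aggregated_row_py_alt (stats_rows : List (List (String × String))) : Option (List (String × String)) :=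
  if stats_rows.isEmpty then none
  else
    let st := stats_rows.foldl pvStep (none, none)
    match st.1 with
    | some a => some a
    | none =>
      match st.2 with
      | some e => some e
      | none => PySem.List.pyGet? stats_rows 0

-- ===== PRECONDITION & SPEC =====
def Spec_pick_aggregated_row_py (stats_rows : List (List (String × String))) (out : Option (List (String × String))) : Prop := out = pick_aggregated_row_py_alt stats_rows
instance (stats_rows : List (List (String × String))) (out : Option (List (String × String))) : Decidable (Spec_pick_aggregated_row_py stats_rows out) := by unfold Spec_pick_aggregated_row_py; infer_instance

-- ===== CLAIM (what is proved, stated in full; the proofs are below) =====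
def Claim_equal_pick_aggregated_row_py : Prop := ∀ (stats_rows : List (List (String × String))), Dom_pick_aggregated_row_py stats_rows → Spec_pick_aggregated_row_py stats_rows (pick_aggregated_row_py stats_rows)

-- ===== LEMMAS AND PROOFS =====
-- B's fold yields exactly (first aggregated row, first endpoint row), slots never overwritten
theorem pvFoldl_step (xs : List (List (String × String)))
    (a e : Option (List (String × String))) :
    xs.foldl pvStep (a, e) =
      (a.orElse (fun _ => pvScanAgg xs), e.orElse (fun _ => pvScanEp xs)) := by
  induction xs generalizing a e with
  | nil => cases a <;> cases e <;> simp [Option.orElse, pvScanAgg, pvScanEp]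
  | cons r rest ih =>
      simp only [List.foldl_cons, pvStep, pvScanAgg, pvScanEp]
      cases a <;> cases e <;>
        simp only [Option.orElse, ih] <;> split_ifs <;> simp

theorem pick_aggregated_row_py_eq (stats_rows : List (List (String × String))) :
    pick_aggregated_row_py stats_rows = pick_aggregated_row_py_alt stats_rows := by
  unfold pick_aggregated_row_py pick_aggregated_row_py_alt
  by_cases h : stats_rows.isEmpty <;> simp [h, pvFoldl_step, Option.orElse]

-- ===== VERDICT (by name: the statement is the Claim_ definition above) =====
theorem pick_aggregated_row_py_spec : Claim_equal_pick_aggregated_row_py := by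
  intro stats_rows _
  unfold Spec_pick_aggregated_row_py
  exact pick_aggregated_row_py_eq stats_rows
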